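-- pv_equiv track=rewrite | github.com/amritessh/mcp-code-analyzer | src/languages/javascript.py | _count_comments
-- ===== SOURCE A (Python) =====
-- from typing import Dict, List, Any, Optional, Set
--
-- def _count_comments(lines: List[str]) -> int:
--     """Count comment lines."""
--     comment_count = 0
--     in_multiline = False
--
--     for line in lines:
--         stripped = line.strip()
--
--         if in_multiline:
--             comment_count += 1
--             if '*/' in line:
--                 in_multiline = False
--         elif stripped.startswith('//'):
--             comment_count += 1
--         elif stripped.startswith('/*'):
--             comment_count += 1
--             if '*/' not in line:
--                 in_multiline = True
--
--     return comment_count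
-- ===== SOURCE B (Python) =====
-- from typing import List
--
-- def _count_comments(lines: List[str]) -> int:
--     """Count comment lines."""
--     count = 0
--     i = 0
--     n = len(lines)
--     while i < n:
--         stripped = lines[i].strip()
--         if stripped.startswith('//'):
--             count += 1
--             i += 1
--         elif stripped.startswith('/*'):
--             count += 1
--             if '*/' in lines[i]:
--                 i += 1
--             else:
--                 i += 1
--                 while i < n:
--                     count += 1
--                     if '*/' in lines[i]:
--                         i += 1
--                         break
--                     i += 1
--         else:
--             i += 1
--     return count
-- ===== Notes on version B (the rewrite author's own statement) =====
-- stated objective: alternative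
-- what changed: Replaced A's single pass carrying a persistent in_multiline boolean flag by an index-driven outer loop with a nested inner loop that consumes an entire /* ... */ block at once, so no cross-iteration state variable is kept.
import Mathlib
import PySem

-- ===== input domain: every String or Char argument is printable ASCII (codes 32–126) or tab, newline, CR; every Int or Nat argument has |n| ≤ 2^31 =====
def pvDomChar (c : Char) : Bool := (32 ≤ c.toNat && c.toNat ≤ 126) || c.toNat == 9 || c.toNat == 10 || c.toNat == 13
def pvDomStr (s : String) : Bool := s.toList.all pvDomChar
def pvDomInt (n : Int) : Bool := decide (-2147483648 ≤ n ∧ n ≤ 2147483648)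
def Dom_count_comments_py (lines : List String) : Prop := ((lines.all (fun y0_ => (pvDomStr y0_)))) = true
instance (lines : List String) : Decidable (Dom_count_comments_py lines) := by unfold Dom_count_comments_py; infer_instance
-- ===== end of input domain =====

-- B replaces A's persistent in_multiline flag by a nested inner loop consuming each /*..*/ block; same counts, same cost (objective: alternative).

-- ===== PORT A =====
-- one loop iteration of A: state (comment_count, in_multiline)
def pvAStep (st : Int × Bool) (line : String) : Int × Bool :=
  let stripped := PySem.Str.strip line
  if st.2 then
    (st.1 + 1, if PySem.Str.isIn "*/" line then false else st.2)
  else if PySem.Str.startswith stripped "//" then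
    (st.1 + 1, st.2)
  else if PySem.Str.startswith stripped "/*" then
    (st.1 + 1, if PySem.Str.isIn "*/" line then st.2 else true)
  else st

def count_comments_py (lines : List String) : Int :=
  (lines.foldl pvAStep (0, false)).1

-- ===== PORT B =====
-- inner while loop of Source B: consume lines up to and including the '*/' line;
-- returns (lines counted, remaining lines after the block)
def pvBSkip : List String → Int × List String
  | [] => (0, [])
  | l :: ls =>
    if PySem.Str.isIn "*/" l then (1, ls)
    else
      let p := pvBSkip ls
      (p.1 + 1, p.2)

-- the remainder after a block is a suffix, needed for bMain's termination
theorem pvBSkip_length (ls : List String) : (pvBSkip ls).2.length ≤ ls.length := by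
  induction ls with
  | nil => simp [pvBSkip]
  | cons l ls ih =>
    simp only [pvBSkip]
    split
    · simp
    · simpa using Nat.le_succ_of_le ih

-- outer while loop of Source B, index walk expressed as recursion on the rest of the list
def pvBMain : List String → Int
  | [] => 0
  | l :: ls =>
    let stripped := PySem.Str.strip l
    if PySem.Str.startswith stripped "//" then 1 + pvBMain ls
    else if PySem.Str.startswith stripped "/*" then
      if PySem.Str.isIn "*/" l then 1 + pvBMain ls
      else
        let p := pvBSkip ls
        1 + p.1 + pvBMain p.2
    else pvBMain ls
termination_by ls => ls.length
decreasing_by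
  all_goals first
    | exact Nat.lt_succ_of_le (pvBSkip_length ls)
    | simp

def count_comments_py_alt (lines : List String) : Int :=
  pvBMain lines

-- ===== PRECONDITION & SPEC =====
def Spec_count_comments_py (lines : List String) (out : Int) : Prop := out = count_comments_py_alt lines
instance (lines : List String) (out : Int) : Decidable (Spec_count_comments_py lines out) := by unfold Spec_count_comments_py; infer_instance

-- ===== CLAIM (what is proved, stated in full; the proofs are below) =====
def Claim_equal_count_comments_py : Prop := ∀ (lines : List String), Dom_count_comments_py lines → Spec_count_comments_py lines (count_comments_py lines)

-- ===== LEMMAS AND PROOFS =====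

-- simultaneous invariant: the fold from flag=false computes bMain; from flag=true it
-- computes the inner-loop count plus the continuation on the remaining lines
theorem pvFold_inv (ls : List String) :
    (∀ c : Int, (ls.foldl pvAStep (c, false)).1 = c + pvBMain ls) ∧
    (∀ c : Int, (ls.foldl pvAStep (c, true)).1 = c + (pvBSkip ls).1 + pvBMain (pvBSkip ls).2) := by
  induction ls with
  | nil => simp [pvBMain, pvBSkip]
  | cons l ls ih =>
    obtain ⟨ihF, ihT⟩ := ih
    constructor
    · intro c
      rw [List.foldl_cons, pvBMain]
      by_cases h1 : PySem.Str.startswith (PySem.Str.strip l) "//" = true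
      · have hs : pvAStep (c, false) l = (c + 1, false) := by
          simp only [pvAStep]; rw [if_neg (by simp), if_pos h1]
        rw [hs, ihF, if_pos h1]; ring
      · by_cases h2 : PySem.Str.startswith (PySem.Str.strip l) "/*" = true
        · by_cases h3 : PySem.Str.isIn "*/" l = true
          · have hs : pvAStep (c, false) l = (c + 1, false) := by
              simp only [pvAStep]; rw [if_neg (by simp), if_neg h1, if_pos h2, if_pos h3]
            rw [hs, ihF, if_neg h1, if_pos h2, if_pos h3]; ring
          · have hs : pvAStep (c, false) l = (c + 1, true) := by
              simp only [pvAStep]; rw [if_neg (by simp), if_neg h1, if_pos h2, if_neg h3]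
            rw [hs, ihT, if_neg h1, if_pos h2, if_neg h3]; ring
        · have hs : pvAStep (c, false) l = (c, false) := by
            simp only [pvAStep]; rw [if_neg (by simp), if_neg h1, if_neg h2]
          rw [hs, ihF, if_neg h1, if_neg h2]
    · intro c
      rw [List.foldl_cons, pvBSkip]
      by_cases h3 : PySem.Str.isIn "*/" l = true
      · have hs : pvAStep (c, true) l = (c + 1, false) := by
          simp only [pvAStep]; simp only [if_true]; rw [if_pos h3]
        rw [hs, ihF, if_pos h3]
      · have hs : pvAStep (c, true) l = (c + 1, true) := by
          simp only [pvAStep]; simp only [if_true]; rw [if_neg h3]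
        rw [hs, ihT, if_neg h3]; ring

-- ===== VERDICT (by name: the statement is the Claim_ definition above) =====
theorem count_comments_py_spec : Claim_equal_count_comments_py := by
  intro lines _
  unfold Spec_count_comments_py count_comments_py count_comments_py_alt
  simpa using (pvFold_inv lines).1 0
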